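-- pv_equiv track=rewrite | github.com/mcjon3z/legion | app/scheduler/risk.py | risk_tags_to_legacy_categories
-- ===== SOURCE A (Python) =====
-- from typing import Any, Dict, Iterable, List, Optional, Set
--
-- VALID_RISK_TAGS = {
--     "exploit_execution",
--     "credential_bruteforce",
--     "password_spray",
--     "account_lockout_risk",
--     "service_instability",
--     "network_flooding",
--     "destructive_write",
--     "persistence_action",
--     "lateral_movement",
--     "high_detection_likelihood",
--     "credential_capture_side_effect",
--     "browser_state_change",
--     "data_exfiltration_risk",
-- }
--
-- LEGACY_CATEGORY_ALIASES = {
--     "destructive_write_actions": "destructive_write",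
-- }
--
-- LEGACY_CATEGORY_TO_RISK_TAGS = {
--     "exploit_execution": {"exploit_execution"},
--     "credential_bruteforce": {
--         "credential_bruteforce",
--         "password_spray",
--         "account_lockout_risk",
--     },
--     "network_flooding": {"network_flooding"},
--     "destructive_write_actions": {"destructive_write"},
-- }
--
-- def _normalize_text(value: Any) -> str:
--     return str(value or "").strip().lower()
--
-- def normalize_risk_tags(values: Optional[Iterable[Any]]) -> List[str]:
--     normalized = []
--     seen: Set[str] = set()
--     for item in list(values or []):
--         tag = LEGACY_CATEGORY_ALIASES.get(_normalize_text(item), _normalize_text(item))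
--         if not tag or tag not in VALID_RISK_TAGS or tag in seen:
--             continue
--         seen.add(tag)
--         normalized.append(tag)
--     return normalized
--
-- def risk_tags_to_legacy_categories(
--         risk_tags: Optional[Iterable[Any]],
--         enabled_categories: Optional[Iterable[Any]] = None,
-- ) -> List[str]:
--     normalized_tags = set(normalize_risk_tags(risk_tags))
--     if enabled_categories is None:
--         requested = list(LEGACY_CATEGORY_TO_RISK_TAGS.keys())
--     else:
--         requested = []
--         for item in list(enabled_categories or []):
--             category = _normalize_text(item)
--             if category in LEGACY_CATEGORY_TO_RISK_TAGS and category not in requested: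
--                 requested.append(category)
--
--     categories = []
--     for category in requested:
--         if LEGACY_CATEGORY_TO_RISK_TAGS.get(category, set()) & normalized_tags:
--             categories.append(category)
--     return categories
-- ===== SOURCE B (Python) =====
-- # B: reverse index tag->category built once; one pass over the tags collects matched
-- # categories, then the requested order is filtered by set membership (no per-category
-- # set intersection). Same objective, different traversal ("alternative").
-- from typing import Any, Iterable, List, Optional
--
-- LEGACY_CATEGORY_ALIASES = {
--     "destructive_write_actions": "destructive_write",
-- }
--
-- LEGACY_CATEGORY_TO_RISK_TAGS = {
--     "exploit_execution": {"exploit_execution"},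
--     "credential_bruteforce": {
--         "credential_bruteforce",
--         "password_spray",
--         "account_lockout_risk",
--     },
--     "network_flooding": {"network_flooding"},
--     "destructive_write_actions": {"destructive_write"},
-- }
--
-- def _normalize_text(value: Any) -> str:
--     return str(value or "").strip().lower()
--
-- def risk_tags_to_legacy_categories(
--         risk_tags: Optional[Iterable[Any]],
--         enabled_categories: Optional[Iterable[Any]] = None,
-- ) -> List[str]:
--     reverse = {}
--     for category, tags in LEGACY_CATEGORY_TO_RISK_TAGS.items():
--         for tag in tags:
--             reverse[tag] = category
--     matched = set()
--     for item in list(risk_tags or []):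
--         text = _normalize_text(item)
--         tag = LEGACY_CATEGORY_ALIASES.get(text, text)
--         category = reverse.get(tag)
--         if category is not None:
--             matched.add(category)
--     if enabled_categories is None:
--         requested = list(LEGACY_CATEGORY_TO_RISK_TAGS.keys())
--     else:
--         requested = []
--         for item in list(enabled_categories or []):
--             category = _normalize_text(item)
--             if category in LEGACY_CATEGORY_TO_RISK_TAGS and category not in requested:
--                 requested.append(category)
--     return [c for c in requested if c in matched]
-- ===== Notes on version B (the rewrite author's own statement) =====
-- stated objective: alternative
-- what changed: B replaces A's normalize-then-intersect structure (building a deduplicated normalized tag list and testing each requested category by set intersection) with a reverse tag-to-category index built once from LEGACY_CATEGORY_TO_RISK_TAGS and a single pass over the raw tags collecting matched categories, then filters the requested order by membership.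
import Mathlib
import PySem

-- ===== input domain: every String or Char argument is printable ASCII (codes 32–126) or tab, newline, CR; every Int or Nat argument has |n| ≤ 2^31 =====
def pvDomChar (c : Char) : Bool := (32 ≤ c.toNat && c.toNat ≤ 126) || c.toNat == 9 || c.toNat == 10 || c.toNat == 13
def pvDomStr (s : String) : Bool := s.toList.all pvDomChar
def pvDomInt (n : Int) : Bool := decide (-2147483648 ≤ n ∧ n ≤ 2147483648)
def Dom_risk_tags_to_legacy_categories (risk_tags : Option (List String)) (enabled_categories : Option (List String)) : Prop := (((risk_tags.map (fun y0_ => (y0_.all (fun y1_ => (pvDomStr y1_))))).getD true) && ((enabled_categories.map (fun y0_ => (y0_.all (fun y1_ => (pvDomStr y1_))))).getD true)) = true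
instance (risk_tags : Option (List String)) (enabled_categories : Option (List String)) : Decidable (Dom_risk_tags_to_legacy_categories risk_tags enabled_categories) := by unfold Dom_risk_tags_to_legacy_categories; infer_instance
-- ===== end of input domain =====

-- B replaces A's per-category set intersections by a reverse tag→category index and a
-- single pass over the tags collecting matched categories ("alternative" decomposition).

-- ===== PORT A =====
-- shared module constants / helpers (used by both Python files)
def pvValidRiskTags : PySem.Set String :=
  PySem.Set.ofList ["exploit_execution", "credential_bruteforce", "password_spray",
    "account_lockout_risk", "service_instability", "network_flooding", "destructive_write",
    "persistence_action", "lateral_movement", "high_detection_likelihood",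
    "credential_capture_side_effect", "browser_state_change", "data_exfiltration_risk"]

def pvAliases : PySem.Dict String String :=
  PySem.Dict.mk [("destructive_write_actions", "destructive_write")]

def pvCatDict : PySem.Dict String (PySem.Set String) :=
  PySem.Dict.mk [
    ("exploit_execution", PySem.Set.ofList ["exploit_execution"]),
    ("credential_bruteforce", PySem.Set.ofList ["credential_bruteforce", "password_spray", "account_lockout_risk"]),
    ("network_flooding", PySem.Set.ofList ["network_flooding"]),
    ("destructive_write_actions", PySem.Set.ofList ["destructive_write"])]

-- _normalize_text: on a str argument, str(value or "") is value itself when value ≠ "" and "" otherwise;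
-- both strip/lower to the same string, so this is exact on String inputs.
def pvNormText (s : String) : String := PySem.Str.lower (PySem.Str.strip s)

def pvNormalizeRiskTags (values : Option (List String)) : List String :=
  ((values.getD []).foldl
    (fun (st : List String × PySem.Set String) item =>
      let tag := PySem.Dict.getD pvAliases (pvNormText item) (pvNormText item)
      if tag == "" || !(PySem.Set.contains pvValidRiskTags tag) || PySem.Set.contains st.2 tag
      then st
      else (st.1 ++ [tag], PySem.Set.add st.2 tag))
    ([], PySem.Set.empty)).1

def pvRequestedA (l : List String) : List String :=
  l.foldl (fun req item =>
    let category := pvNormText item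
    if PySem.Dict.contains pvCatDict category && !(req.contains category)
    then req ++ [category] else req) []

def risk_tags_to_legacy_categories (risk_tags : Option (List String)) (enabled_categories : Option (List String)) : List String :=
  let normalized_tags : PySem.Set String := PySem.Set.ofList (pvNormalizeRiskTags risk_tags)
  let requested : List String :=
    match enabled_categories with
    | none => PySem.Dict.keys pvCatDict
    | some l => pvRequestedA l
  requested.foldl (fun cats category =>
    if !(PySem.Set.inter (PySem.Dict.getD pvCatDict category PySem.Set.empty) normalized_tags).isEmpty
    then cats ++ [category] else cats) []

-- ===== PORT B =====
def pvReverse : PySem.Dict String String :=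
  (PySem.Dict.items pvCatDict).foldl
    (fun d p => p.2.foldl (fun d tag => PySem.Dict.insert d tag p.1) d)
    PySem.Dict.empty

def pvMatched (values : Option (List String)) : PySem.Set String :=
  (values.getD []).foldl (fun m item =>
    let text := pvNormText item
    let tag := PySem.Dict.getD pvAliases text text
    match PySem.Dict.get? pvReverse tag with
    | some category => PySem.Set.add m category
    | none => m) PySem.Set.empty

def pvRequestedB (l : List String) : List String :=
  l.foldl (fun req item =>
    let category := pvNormText item
    if PySem.Dict.contains pvCatDict category && !(req.contains category)
    then req ++ [category] else req) []

def risk_tags_to_legacy_categories_alt (risk_tags : Option (List String)) (enabled_categories : Option (List String)) : List String :=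
  let matched : PySem.Set String := pvMatched risk_tags
  let requested : List String :=
    match enabled_categories with
    | none => PySem.Dict.keys pvCatDict
    | some l => pvRequestedB l
  requested.filter (fun c => PySem.Set.contains matched c)

-- ===== PRECONDITION & SPEC =====
def Spec_risk_tags_to_legacy_categories (risk_tags : Option (List String)) (enabled_categories : Option (List String)) (out : List String) : Prop := out = risk_tags_to_legacy_categories_alt risk_tags enabled_categories
instance (risk_tags : Option (List String)) (enabled_categories : Option (List String)) (out : List String) : Decidable (Spec_risk_tags_to_legacy_categories risk_tags enabled_categories out) := by unfold Spec_risk_tags_to_legacy_categories; infer_instance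

-- ===== CLAIM (what is proved, stated in full; the proofs are below) =====
def Claim_equal_risk_tags_to_legacy_categories : Prop := ∀ (risk_tags : Option (List String)) (enabled_categories : Option (List String)), Dom_risk_tags_to_legacy_categories risk_tags enabled_categories → Spec_risk_tags_to_legacy_categories risk_tags enabled_categories (risk_tags_to_legacy_categories risk_tags enabled_categories)

-- ===== LEMMAS AND PROOFS =====

-- helper naming the tag normalisation both ports apply per item
def pvTagOf (item : String) : String :=
  PySem.Dict.getD pvAliases (pvNormText item) (pvNormText item)

theorem pvReverse_eq : pvReverse = PySem.Dict.mk [("exploit_execution","exploit_execution"),("credential_bruteforce","credential_bruteforce"),("password_spray","credential_bruteforce"),("account_lockout_risk","credential_bruteforce"),("network_flooding","network_flooding"),("destructive_write","destructive_write_actions")] := by decide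

theorem rev_ee (t : String) : (PySem.Dict.get? pvReverse t = some "exploit_execution") ↔ (t = "exploit_execution") := by
  rw [pvReverse_eq]
  simp [PySem.Dict.get?_mk_cons]
  split_ifs <;> simp_all [eq_comm, PySem.Dict.get?]

theorem rev_cb (t : String) : (PySem.Dict.get? pvReverse t = some "credential_bruteforce") ↔ (t = "credential_bruteforce" ∨ t = "password_spray" ∨ t = "account_lockout_risk") := by
  rw [pvReverse_eq]
  simp [PySem.Dict.get?_mk_cons]
  split_ifs <;> simp_all [eq_comm, PySem.Dict.get?]

theorem rev_nf (t : String) : (PySem.Dict.get? pvReverse t = some "network_flooding") ↔ (t = "network_flooding") := by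
  rw [pvReverse_eq]
  simp [PySem.Dict.get?_mk_cons]
  split_ifs <;> simp_all [eq_comm, PySem.Dict.get?]

theorem rev_dw (t : String) : (PySem.Dict.get? pvReverse t = some "destructive_write_actions") ↔ (t = "destructive_write") := by
  rw [pvReverse_eq]
  simp [PySem.Dict.get?_mk_cons]
  split_ifs <;> simp_all [eq_comm, PySem.Dict.get?]

theorem matched_fold_mem (l : List String) (m : PySem.Set String) (c : String) :
    (c ∈ l.foldl (fun m item =>
      match PySem.Dict.get? pvReverse (PySem.Dict.getD pvAliases (pvNormText item) (pvNormText item)) with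
      | some category => PySem.Set.add m category
      | none => m) m) ↔ c ∈ m ∨ ∃ item ∈ l, PySem.Dict.get? pvReverse (pvTagOf item) = some c := by
  induction l generalizing m with
  | nil => simp
  | cons a l ih =>
    simp only [List.foldl_cons, List.exists_mem_cons_iff, pvTagOf]
    rcases h : PySem.Dict.get? pvReverse (PySem.Dict.getD pvAliases (pvNormText a) (pvNormText a)) with _ | cat
    · rw [show (match (none : Option String) with
        | some category => PySem.Set.add m category
        | none => m) = m from rfl]
      rw [ih m]
      simp only [pvTagOf]
      constructor
      · rintro (h1 | h1)
        · exact Or.inl h1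
        · exact Or.inr (Or.inr h1)
      · rintro (h1 | h1 | h1)
        · exact Or.inl h1
        · exact absurd h1 (by simp)
        · exact Or.inr h1
    · rw [show (match (some cat : Option String) with
        | some category => PySem.Set.add m category
        | none => m) = PySem.Set.add m cat from rfl]
      rw [ih (PySem.Set.add m cat)]
      simp only [pvTagOf, PySem.Set.mem_add, Option.some_inj]
      constructor
      · rintro ((h1 | rfl) | h1)
        · exact Or.inl h1
        · exact Or.inr (Or.inl rfl)
        · exact Or.inr (Or.inr h1)
      · rintro (h1 | h1 | h1)
        · exact Or.inl (Or.inl h1)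
        · exact Or.inl (Or.inr h1.symm)
        · exact Or.inr h1

theorem mem_matched (rt : Option (List String)) (c : String) :
    c ∈ pvMatched rt ↔ ∃ item ∈ rt.getD [], PySem.Dict.get? pvReverse (pvTagOf item) = some c := by
  unfold pvMatched
  rw [matched_fold_mem]
  simp [PySem.Set.empty]

theorem empty_not_valid : ¬ ("" : String) ∈ pvValidRiskTags := by decide

set_option maxHeartbeats 1000000 in
theorem norm_fold_mem (l : List String) (acc : List String) (seen : PySem.Set String)
    (hinv : ∀ x, x ∈ seen ↔ x ∈ acc) (t : String) :
    (t ∈ (l.foldl (fun (st : List String × PySem.Set String) item =>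
      if PySem.Dict.getD pvAliases (pvNormText item) (pvNormText item) == "" || !(PySem.Set.contains pvValidRiskTags (PySem.Dict.getD pvAliases (pvNormText item) (pvNormText item))) || PySem.Set.contains st.2 (PySem.Dict.getD pvAliases (pvNormText item) (pvNormText item))
      then st
      else (st.1 ++ [PySem.Dict.getD pvAliases (pvNormText item) (pvNormText item)], PySem.Set.add st.2 (PySem.Dict.getD pvAliases (pvNormText item) (pvNormText item)))) (acc, seen)).1)
    ↔ t ∈ acc ∨ (t ∈ pvValidRiskTags ∧ ∃ item ∈ l, pvTagOf item = t) := by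
  induction l generalizing acc seen with
  | nil => simp
  | cons a l ih =>
    simp only [List.foldl_cons, List.exists_mem_cons_iff]
    by_cases hcond : (PySem.Dict.getD pvAliases (pvNormText a) (pvNormText a) == "" || !(PySem.Set.contains pvValidRiskTags (PySem.Dict.getD pvAliases (pvNormText a) (pvNormText a))) || PySem.Set.contains seen (PySem.Dict.getD pvAliases (pvNormText a) (pvNormText a))) = true
    · rw [if_pos hcond]
      rw [ih acc seen hinv]
      constructor
      · rintro (h1 | ⟨hv, hex⟩)
        · exact Or.inl h1
        · exact Or.inr ⟨hv, Or.inr hex⟩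
      · rintro (h1 | ⟨hv, h1 | hex⟩)
        · exact Or.inl h1
        · -- the item was skipped: since it is valid and nonempty, the `seen` guard fired
          rw [show pvTagOf a = PySem.Dict.getD pvAliases (pvNormText a) (pvNormText a) from rfl] at h1
          rw [h1] at hcond
          have hne : (t == "") = false := by
            cases hb : t == "" with
            | false => rfl
            | true => exact absurd hv (by rw [eq_of_beq hb]; exact empty_not_valid)
          have hvb : PySem.Set.contains pvValidRiskTags t = true :=
            (PySem.Set.contains_iff _ _).mpr hv
          rw [hne, hvb] at hcond
          simp only [Bool.not_true, Bool.or_false, Bool.false_or] at hcond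
          exact Or.inl ((hinv _).mp ((PySem.Set.contains_iff _ _).mp hcond))
        · exact Or.inr ⟨hv, hex⟩
    · rw [if_neg hcond]
      have hcond' := hcond
      simp only [Bool.or_eq_true, not_or, Bool.not_eq_true] at hcond'
      obtain ⟨⟨hne, hnval⟩, hseen⟩ := hcond'
      have hval : PySem.Dict.getD pvAliases (pvNormText a) (pvNormText a) ∈ pvValidRiskTags := by
        apply (PySem.Set.contains_iff _ _).mp
        revert hnval
        cases PySem.Set.contains pvValidRiskTags (PySem.Dict.getD pvAliases (pvNormText a) (pvNormText a)) <;> simp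
      have hinv' : ∀ x, x ∈ PySem.Set.add seen (PySem.Dict.getD pvAliases (pvNormText a) (pvNormText a)) ↔ x ∈ acc ++ [PySem.Dict.getD pvAliases (pvNormText a) (pvNormText a)] := by
        intro x
        rw [PySem.Set.mem_add, List.mem_append, List.mem_singleton, hinv]
      rw [ih _ _ hinv']
      simp only [List.mem_append, List.mem_singleton, pvTagOf]
      constructor
      · rintro ((h1 | rfl) | ⟨hv, hex⟩)
        · exact Or.inl h1
        · exact Or.inr ⟨hval, Or.inl rfl⟩
        · exact Or.inr ⟨hv, Or.inr hex⟩
      · rintro (h1 | ⟨hv, h1 | hex⟩)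
        · exact Or.inl (Or.inl h1)
        · exact Or.inl (Or.inr h1.symm)
        · exact Or.inr ⟨hv, hex⟩

theorem mem_norm (rt : Option (List String)) (t : String) :
    t ∈ pvNormalizeRiskTags rt ↔ t ∈ pvValidRiskTags ∧ ∃ item ∈ rt.getD [], pvTagOf item = t := by
  unfold pvNormalizeRiskTags
  rw [norm_fold_mem _ _ _ (by intro x; simp [PySem.Set.empty])]
  simp

theorem pointwise (rt : Option (List String)) (c : String) (hc : c ∈ PySem.Dict.keys pvCatDict) :
    (!(PySem.Set.inter (PySem.Dict.getD pvCatDict c PySem.Set.empty) (PySem.Set.ofList (pvNormalizeRiskTags rt))).isEmpty)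
      = PySem.Set.contains (pvMatched rt) c := by
  have hkeys : PySem.Dict.keys pvCatDict = ["exploit_execution","credential_bruteforce","network_flooding","destructive_write_actions"] := by decide
  rw [hkeys] at hc
  rw [Bool.eq_iff_iff]
  rw [Bool.not_eq_eq_eq_not, Bool.not_true, List.isEmpty_eq_false_iff]
  rw [ne_eq, List.eq_nil_iff_forall_not_mem]
  rw [PySem.Set.contains_iff, mem_matched]
  simp only [not_forall, not_not, PySem.Set.mem_inter, PySem.Set.mem_ofList, mem_norm]
  rcases List.mem_cons.mp hc with rfl | hc
  · have hget : PySem.Dict.getD pvCatDict "exploit_execution" PySem.Set.empty = ["exploit_execution"] := by decide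
    rw [hget]
    constructor
    · rintro ⟨y, hy, _, i, hi, hit⟩
      simp only [List.mem_singleton] at hy; subst hy
      exact ⟨i, hi, (rev_ee _).mpr hit⟩
    · rintro ⟨i, hi, h⟩
      exact ⟨"exploit_execution", by simp, ⟨by decide, i, hi, (rev_ee _).mp h⟩⟩
  rcases List.mem_cons.mp hc with rfl | hc
  · have hget : PySem.Dict.getD pvCatDict "credential_bruteforce" PySem.Set.empty = ["credential_bruteforce","password_spray","account_lockout_risk"] := by decide
    rw [hget]
    constructor
    · rintro ⟨y, hy, _, i, hi, hit⟩
      refine ⟨i, hi, (rev_cb _).mpr ?_⟩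
      subst hit
      simpa using hy
    · rintro ⟨i, hi, h⟩
      rcases (rev_cb _).mp h with h1 | h1 | h1 <;>
        exact ⟨pvTagOf i, by simp [h1], ⟨by rw [h1]; decide, i, hi, rfl⟩⟩
  rcases List.mem_cons.mp hc with rfl | hc
  · have hget : PySem.Dict.getD pvCatDict "network_flooding" PySem.Set.empty = ["network_flooding"] := by decide
    rw [hget]
    constructor
    · rintro ⟨y, hy, _, i, hi, hit⟩
      simp only [List.mem_singleton] at hy; subst hy
      exact ⟨i, hi, (rev_nf _).mpr hit⟩
    · rintro ⟨i, hi, h⟩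
      exact ⟨"network_flooding", by simp, ⟨by decide, i, hi, (rev_nf _).mp h⟩⟩
  rcases List.mem_cons.mp hc with rfl | hc
  · have hget : PySem.Dict.getD pvCatDict "destructive_write_actions" PySem.Set.empty = ["destructive_write"] := by decide
    rw [hget]
    constructor
    · rintro ⟨y, hy, _, i, hi, hit⟩
      simp only [List.mem_singleton] at hy; subst hy
      exact ⟨i, hi, (rev_dw _).mpr hit⟩
    · rintro ⟨i, hi, h⟩
      exact ⟨"destructive_write", by simp, ⟨by decide, i, hi, (rev_dw _).mp h⟩⟩
  simp at hc

theorem reqA_fold_sub (l : List String) (acc : List String)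
    (h : ∀ x ∈ acc, x ∈ PySem.Dict.keys pvCatDict) :
    ∀ x ∈ l.foldl (fun req item =>
      let category := pvNormText item
      if PySem.Dict.contains pvCatDict category && !(req.contains category)
      then req ++ [category] else req) acc, x ∈ PySem.Dict.keys pvCatDict := by
  induction l generalizing acc with
  | nil => simpa using h
  | cons a l ih =>
    simp only [List.foldl_cons]
    by_cases hcond : (PySem.Dict.contains pvCatDict (pvNormText a) && !(acc.contains (pvNormText a))) = true
    · rw [if_pos hcond]
      apply ih
      intro x hx
      rcases List.mem_append.mp hx with hx | hx
      · exact h x hx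
      · rw [List.mem_singleton.mp hx]
        exact (PySem.Dict.contains_iff_mem_keys _ _).mp (Bool.and_elim_left hcond)
    · rw [if_neg hcond]
      exact ih acc h

theorem reqA_sub (l : List String) : ∀ x ∈ pvRequestedA l, x ∈ PySem.Dict.keys pvCatDict := by
  unfold pvRequestedA
  exact reqA_fold_sub l [] (by simp)

theorem main_eq (rt : Option (List String)) (ec : Option (List String)) :
    risk_tags_to_legacy_categories rt ec = risk_tags_to_legacy_categories_alt rt ec := by
  unfold risk_tags_to_legacy_categories risk_tags_to_legacy_categories_alt
  cases ec with
  | none =>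
    rw [PySem.List.foldl_append_if_eq_filter
      (fun category => !(PySem.Set.inter (PySem.Dict.getD pvCatDict category PySem.Set.empty) (PySem.Set.ofList (pvNormalizeRiskTags rt))).isEmpty)]
    rw [List.nil_append]
    exact List.filter_congr (fun c hc => pointwise rt c hc)
  | some l =>
    rw [PySem.List.foldl_append_if_eq_filter
      (fun category => !(PySem.Set.inter (PySem.Dict.getD pvCatDict category PySem.Set.empty) (PySem.Set.ofList (pvNormalizeRiskTags rt))).isEmpty)]
    rw [List.nil_append]
    exact List.filter_congr (fun c hc => pointwise rt c (reqA_sub l c hc))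

-- ===== VERDICT (by name: the statement is the Claim_ definition above) =====
theorem risk_tags_to_legacy_categories_spec : Claim_equal_risk_tags_to_legacy_categories := by
  intro rt ec _
  unfold Spec_risk_tags_to_legacy_categories
  exact main_eq rt ec
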